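-- pv_equiv track=rewrite | github.com/AllenGao6/Briefly2.0 | Briefly/api/speech_to_text.py | get_sentence_words_count
-- ===== SOURCE A (Python) =====
-- def get_sentence_words_count(sentences):
--     count = 0
--     words_counter = {}
--     for index, sentence in enumerate(sentences):
--         words_count = len(sentence.split(' '))
--         words_counter[count] = sentence
--         count += words_count
--     return words_counter
-- ===== SOURCE B (Python) =====
-- def get_sentence_words_count(sentences):
--     # back-to-front: total word count first, then walk reversed subtracting
--     # each sentence's word count to obtain its key (suffix sums from total);
--     # keys are unique since every word count is >= 1
--     total = sum(len(s.split(' ')) for s in sentences)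
--     rev = []
--     remaining = total
--     for s in reversed(sentences):
--         remaining -= len(s.split(' '))
--         rev.append((remaining, s))
--     return dict(reversed(rev))
-- ===== Notes on version B (the rewrite author's own statement) =====
-- stated objective: alternative
-- what changed: Instead of a forward loop accumulating a running offset into a dict, B computes the total word count once and traverses the sentences in reverse, deriving each key by subtracting that sentence's word count from the remaining total (suffix sums), building the pairs back-to-front and reversing at the end.
import Mathlib
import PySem

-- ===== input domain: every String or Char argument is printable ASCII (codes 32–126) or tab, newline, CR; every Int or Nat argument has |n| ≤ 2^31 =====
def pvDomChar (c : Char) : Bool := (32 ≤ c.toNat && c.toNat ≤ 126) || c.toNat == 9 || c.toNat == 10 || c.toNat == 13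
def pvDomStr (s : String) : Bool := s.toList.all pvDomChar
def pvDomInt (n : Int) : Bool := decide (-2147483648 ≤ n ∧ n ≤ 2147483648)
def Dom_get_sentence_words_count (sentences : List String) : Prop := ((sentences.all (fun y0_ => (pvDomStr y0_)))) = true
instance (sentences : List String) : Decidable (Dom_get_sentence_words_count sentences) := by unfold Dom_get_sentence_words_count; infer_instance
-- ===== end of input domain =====

-- B replaces A's forward dict-accumulating loop by a reverse traversal keyed by
-- suffix sums subtracted from the precomputed total word count (alternative, same cost).

-- ===== PORT A =====
def get_sentence_words_count (sentences : List String) : List (Int × String) :=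
  -- count = 0; words_counter = {}; for sentence in sentences: ...
  (sentences.foldl
    (fun (st : Int × PySem.Dict Int String) sentence =>
      let words_count : Int := (((PySem.Str.split? sentence " ").getD []).length : Int)
      (st.1 + words_count, st.2.insert st.1 sentence))
    (0, PySem.Dict.empty)).2.items

-- ===== PORT B =====
def get_sentence_words_count_alt (sentences : List String) : List (Int × String) :=
  -- total = sum(len(s.split(' ')) for s in sentences)
  let total : Int := sentences.foldl
    (fun a s => a + (((PySem.Str.split? s " ").getD []).length : Int)) 0
  -- rev = []; remaining = total; for s in reversed(sentences): remaining -= wc; rev.append(...)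
  let rev := sentences.reverse.foldl
    (fun (st : Int × List (Int × String)) s =>
      let remaining := st.1 - (((PySem.Str.split? s " ").getD []).length : Int)
      (remaining, st.2 ++ [(remaining, s)])) (total, [])
  -- dict(reversed(rev)): keys are distinct (each word count >= 1), so the assoc list is rev.2 reversed
  rev.2.reverse

-- ===== PRECONDITION & SPEC =====
def Spec_get_sentence_words_count (sentences : List String) (out : List (Int × String)) : Prop := out = get_sentence_words_count_alt sentences
instance (sentences : List String) (out : List (Int × String)) : Decidable (Spec_get_sentence_words_count sentences out) := by unfold Spec_get_sentence_words_count; infer_instance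

-- ===== CLAIM (what is proved, stated in full; the proofs are below) =====
def Claim_equal_get_sentence_words_count : Prop := ∀ (sentences : List String), Dom_get_sentence_words_count sentences → Spec_get_sentence_words_count sentences (get_sentence_words_count sentences)

-- ===== LEMMAS AND PROOFS =====

def pvWc (s : String) : Int := (((PySem.Str.split? s " ").getD []).length : Int)

def pvS (l : List String) : Int := (l.map pvWc).sum

-- the pairs A produces, front to back, starting at offset c
def pvBuild (c : Int) : List String → List (Int × String)
  | [] => []
  | s :: ss => (c, s) :: pvBuild (c + pvWc s) ss

-- the pairs B's reverse loop appends, given remaining = t at entry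
def pvG (t : Int) : List String → List (Int × String)
  | [] => []
  | s :: ss => (t - pvWc s, s) :: pvG (t - pvWc s) ss

theorem pvGo_ne_nil (sep : List Char) (fuel : Nat) (l cur : List Char) (acc : List (List Char)) :
    PySem.Chars.splitOn.go sep fuel l cur acc ≠ [] := by
  induction fuel generalizing l cur acc with
  | zero => simp [PySem.Chars.splitOn.go]
  | succ n ih =>
    cases l with
    | nil => simp [PySem.Chars.splitOn.go]
    | cons c rest =>
      rw [PySem.Chars.splitOn.go]
      split_ifs <;> exact ih _ _ _

theorem pvWc_pos (s : String) : 1 ≤ pvWc s := by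
  unfold pvWc
  have hne : (" ".toList.isEmpty) = false := by decide
  simp only [PySem.Str.split?, PySem.Chars.split?, PySem.Chars.splitOn, hne,
    Bool.false_eq_true, if_false, Option.map_some, Option.getD_some, List.length_map]
  have h := pvGo_ne_nil (" ".toList) (s.toList.length + 1) s.toList [] []
  exact_mod_cast List.length_pos_iff.mpr h

theorem pvA_loop (ss : List String) (c : Int) (d : PySem.Dict Int String)
    (h : ∀ k ∈ d.keys, k < c) :
    (ss.foldl
      (fun (st : Int × PySem.Dict Int String) sentence =>
        let words_count : Int := (((PySem.Str.split? sentence " ").getD []).length : Int)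
        (st.1 + words_count, st.2.insert st.1 sentence))
      (c, d)).2.items = d.items ++ pvBuild c ss := by
  induction ss generalizing c d with
  | nil => simp [pvBuild]
  | cons s ss ih =>
    have hfresh : d.contains c = false := by
      by_contra hc
      have : c ∈ d.keys := (PySem.Dict.contains_iff_mem_keys d c).mp (by simpa using hc)
      exact absurd (h c this) (lt_irrefl c)
    have hrec := ih (c + pvWc s) (d.insert c s)
      (by
        intro k hk
        rcases (PySem.Dict.mem_keys_insert d c k s).mp hk with rfl | hk'
        · have := pvWc_pos s; omega
        · have := h k hk'; have := pvWc_pos s; omega)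
    simp only [List.foldl_cons]
    rw [show (((PySem.Str.split? s " ").getD []).length : Int) = pvWc s from rfl] at *
    rw [hrec, PySem.Dict.items_insert_of_not_contains d s hfresh]
    simp [pvBuild]

theorem pvSum_foldl (l : List String) (a : Int) :
    l.foldl (fun a s => a + (((PySem.Str.split? s " ").getD []).length : Int)) a = a + pvS l := by
  induction l generalizing a with
  | nil => simp [pvS]
  | cons s ss ih =>
    simp only [List.foldl_cons, ih]
    show a + pvWc s + pvS ss = a + pvS (s :: ss)
    simp [pvS]; ring

theorem pvB_loop (ys : List String) (t : Int) (acc : List (Int × String)) :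
    ys.foldl
      (fun (st : Int × List (Int × String)) s =>
        let remaining := st.1 - (((PySem.Str.split? s " ").getD []).length : Int)
        (remaining, st.2 ++ [(remaining, s)])) (t, acc) = (t - pvS ys, acc ++ pvG t ys) := by
  induction ys generalizing t acc with
  | nil => simp [pvS, pvG]
  | cons s ss ih =>
    simp only [List.foldl_cons, ih]
    show (t - pvWc s - pvS ss, (acc ++ [(t - pvWc s, s)]) ++ pvG (t - pvWc s) ss)
       = (t - pvS (s :: ss), acc ++ pvG t (s :: ss))
    simp [pvS, pvG]; ring

theorem pvG_append (ys zs : List String) (t : Int) :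
    pvG t (ys ++ zs) = pvG t ys ++ pvG (t - pvS ys) zs := by
  induction ys generalizing t with
  | nil => simp [pvS, pvG]
  | cons s ss ih =>
    simp only [List.cons_append, pvG, ih]
    have : t - pvWc s - pvS ss = t - pvS (s :: ss) := by simp [pvS]; ring
    rw [this]

theorem pvS_reverse (l : List String) : pvS l.reverse = pvS l := by
  simp [pvS]

theorem pvG_rev (l : List String) (t : Int) :
    (pvG t l.reverse).reverse = pvBuild (t - pvS l) l := by
  induction l generalizing t with
  | nil => simp [pvG, pvBuild]
  | cons s ss ih =>
    rw [List.reverse_cons, pvG_append]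
    simp only [pvG, List.reverse_append, List.reverse_cons, List.reverse_nil,
      List.nil_append, pvBuild]
    rw [ih, pvS_reverse]
    have h1 : t - pvS ss - pvWc s = t - pvS (s :: ss) := by simp [pvS]; ring
    have h2 : t - pvS ss = t - pvS (s :: ss) + pvWc s := by simp [pvS]; ring
    rw [h1]
    conv_lhs => rw [h2]
    simp

-- ===== VERDICT (by name: the statement is the Claim_ definition above) =====
theorem get_sentence_words_count_spec : Claim_equal_get_sentence_words_count := by
  intro sentences _
  unfold Spec_get_sentence_words_count get_sentence_words_count get_sentence_words_count_alt
  have hA := pvA_loop sentences 0 PySem.Dict.empty (by simp [PySem.Dict.keys, PySem.Dict.empty])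
  rw [hA]
  simp only [pvB_loop, List.nil_append, pvG_rev, pvSum_foldl]
  have : 0 + pvS sentences - pvS sentences = 0 := by ring
  rw [this]
  simp [PySem.Dict.empty]
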